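-- pv_equiv track=rewrite | github.com/MrHedmad/cellular-codes | PythonCode/Project Bioinformatics/Chapter_One.py | immediate_neighbours
-- ===== SOURCE A (Python) =====
-- def immediate_neighbours(pattern):
--     """Return each neighbour of pattern with hemming distance 1."""
--     neighbours = set()
--     neighbours.add(pattern)  # The first pattern is a neighbour of itself.
--     symbols = set(["A", "C", "T", "G"])  # Used to change the letter later.
--
--     for i in range(0, len(pattern)):  # For each letter in the pattern
--         modpattern = list(pattern)    # A list is mutable
--         last_symbol = pattern[i]
--         # Change a letter at a time with every other letter (except itself).
--         for element in symbols - set(last_symbol):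
--             modpattern[i] = element
--             neighbours.add("".join(modpattern))
--
--     return neighbours
-- ===== SOURCE B (Python) =====
-- def immediate_neighbours(pattern):
--     """Return each neighbour of pattern with hemming distance 1."""
--     # Build the neighbour set of every suffix, from the empty suffix up:
--     # a neighbour of head+suffix is either a substitution at the first
--     # position, or head prepended to a neighbour of the suffix.
--     neighbours = {""}
--     suffix = ""
--     for head in reversed(pattern):
--         new = {head + suffix}
--         for symbol in "ACTG":
--             new.add(symbol + suffix)
--         for s in neighbours:
--             new.add(head + s)
--         neighbours = new
--         suffix = head + suffix
--     return neighbours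
-- ===== Notes on version B (the rewrite author's own statement) =====
-- stated objective: alternative
-- what changed: Replaces A's index-based double loop (mutating a char list and taking a set difference of the alphabet per position) with a single suffix-to-full-string sweep that builds each suffix's neighbour set from the previous one by prepending the head symbol or a substituted symbol; B trades extra character copying (it re-prefixes every suffix neighbour each step) for the incremental set construction.
import Mathlib
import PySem

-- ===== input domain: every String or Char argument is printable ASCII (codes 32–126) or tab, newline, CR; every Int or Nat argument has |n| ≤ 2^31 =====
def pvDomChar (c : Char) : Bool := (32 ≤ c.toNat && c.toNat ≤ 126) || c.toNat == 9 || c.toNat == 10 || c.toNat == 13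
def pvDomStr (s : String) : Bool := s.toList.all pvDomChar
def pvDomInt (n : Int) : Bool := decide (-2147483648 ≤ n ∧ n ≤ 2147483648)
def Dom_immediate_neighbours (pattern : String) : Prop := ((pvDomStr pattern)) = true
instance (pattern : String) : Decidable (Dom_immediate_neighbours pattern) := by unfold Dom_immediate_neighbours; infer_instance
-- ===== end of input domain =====

-- B replaces A's index-based double loop over a mutable char list by a single
-- suffix-to-full-string sweep building each suffix's neighbour set from the
-- previous one (alternative decomposition; it copies each suffix set forward,
-- so it does more character copying than A on long patterns).


-- ===== PORT A =====
-- The set holds the joined strings; we keep them as their character lists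
-- (String.ofList is applied at return — exact, since "".join over chars is String.ofList
-- and string equality is character-list equality).  Python's repeated
-- `modpattern[i] = element` on the list reset each outer step is `cs.set i e`.
def immediate_neighbours (pattern : String) : List String :=
  let cs := pattern.toList
  let neighbours0 : PySem.Set (List Char) := PySem.Set.add PySem.Set.empty cs
  let symbols : PySem.Set Char := PySem.Set.ofList ['A', 'C', 'T', 'G']
  ((List.range cs.length).foldl (fun neighbours i =>
      let lastSymbol := cs.getD i ' '
      (PySem.Set.diff symbols (PySem.Set.ofList [lastSymbol])).foldl
        (fun nb element => PySem.Set.add nb (cs.set i element)) neighbours)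
    neighbours0).map String.ofList

-- ===== PORT B =====
-- one loop step: from the neighbour set of `suffix` to that of `head :: suffix`
def pvAltStep (st : PySem.Set (List Char) × List Char) (head : Char) :
    PySem.Set (List Char) × List Char :=
  let new0 : PySem.Set (List Char) := PySem.Set.add PySem.Set.empty (head :: st.2)
  let new1 := ['A', 'C', 'T', 'G'].foldl (fun s symbol => PySem.Set.add s (symbol :: st.2)) new0
  let new2 := st.1.foldl (fun s x => PySem.Set.add s (head :: x)) new1
  (new2, head :: st.2)

def immediate_neighbours_alt (pattern : String) : List String :=
  ((pattern.toList.reverse.foldl pvAltStep (PySem.Set.add PySem.Set.empty [], [])).1).map String.ofList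

-- ===== PRECONDITION & SPEC =====
def Spec_immediate_neighbours (pattern : String) (out : List String) : Prop := out = immediate_neighbours_alt pattern
instance (pattern : String) (out : List String) : Decidable (Spec_immediate_neighbours pattern out) := by unfold Spec_immediate_neighbours; infer_instance

-- ===== CLAIM (what is proved, stated in full; the proofs are below) =====
def Claim_equal_immediate_neighbours : Prop := ∀ (pattern : String), Dom_immediate_neighbours pattern → Spec_immediate_neighbours pattern (immediate_neighbours pattern)

-- ===== LEMMAS AND PROOFS =====

-- canonical neighbour list: the pattern, then all one-position substitutions
-- in position order, alphabet order 'A','C','T','G' minus the original symbol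
def pvSub : List Char → List (List Char)
  | [] => []
  | h :: t => (['A', 'C', 'T', 'G'].filter (fun c => !decide (c = h))).map (fun c => c :: t)
      ++ (pvSub t).map (fun x => h :: x)

theorem pvSub_shape {cs x : List Char} (hx : x ∈ pvSub cs) : x.length = cs.length ∧ x ≠ cs := by
  induction cs generalizing x with
  | nil => simp [pvSub] at hx
  | cons h t ih =>
    simp only [pvSub, List.mem_append, List.mem_map, List.mem_filter] at hx
    rcases hx with ⟨c, ⟨-, hc⟩, rfl⟩ | ⟨y, hy, rfl⟩
    · refine ⟨rfl, ?_⟩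
      simp at hc; simp [hc]
    · obtain ⟨hl, hne⟩ := ih hy
      exact ⟨by simp [hl], by simp [hne]⟩

theorem pvSub_nodup (cs : List Char) : (cs :: pvSub cs).Nodup := by
  induction cs with
  | nil => simp [pvSub]
  | cons h t ih =>
    have htn : (pvSub t).Nodup := (List.nodup_cons.mp ih).2
    have htm : t ∉ pvSub t := (List.nodup_cons.mp ih).1
    refine List.nodup_cons.mpr ⟨?_, ?_⟩
    · simp only [pvSub, List.mem_append, List.mem_map, List.mem_filter]
      rintro (⟨c, ⟨-, hc⟩, he⟩ | ⟨y, hy, he⟩)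
      · simp at hc; rw [List.cons.injEq] at he; exact hc he.1
      · rw [List.cons.injEq] at he; exact (pvSub_shape hy).2 he.2
    · simp only [pvSub]
      refine List.Nodup.append ?_ ?_ ?_
      · exact (List.Nodup.filter _ (by decide)).map (fun a b => by simp)
      · exact htn.map (fun a b => by simp)
      · intro x hx hy
        simp only [List.mem_map, List.mem_filter] at hx hy
        obtain ⟨c, ⟨-, hc⟩, rfl⟩ := hx
        obtain ⟨y, -, he⟩ := hy
        simp at hc
        rw [List.cons.injEq] at he
        exact hc he.1.symm

-- ===== A side =====
def pvSubIdx (cs : List Char) (k : Nat) : List (List Char) :=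
  (List.range k).flatMap (fun i =>
    (['A', 'C', 'T', 'G'].filter (fun c => !decide (c = cs.getD i ' '))).map (fun c => cs.set i c))

theorem pvSubIdx_mem {cs x : List Char} {k : Nat} (hk : k ≤ cs.length) (hx : x ∈ pvSubIdx cs k) :
    ∃ j, ∃ (hj : j < k), ∃ c, c ≠ cs[j]'(by omega) ∧ x = cs.set j c := by
  simp only [pvSubIdx, List.mem_flatMap, List.mem_map, List.mem_filter, List.mem_range] at hx
  obtain ⟨j, hj, c, ⟨-, hc⟩, rfl⟩ := hx
  refine ⟨j, hj, c, ?_, rfl⟩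
  simp only [List.getD_eq_getElem?_getD, List.getElem?_eq_getElem (by omega : j < cs.length)] at hc
  simpa using hc

theorem pvA_step (cs : List Char) (i : Nat) (hi : i < cs.length) :
    (PySem.Set.diff (PySem.Set.ofList ['A', 'C', 'T', 'G']) (PySem.Set.ofList [cs.getD i ' '])).foldl
        (fun nb element => PySem.Set.add nb (cs.set i element)) (cs :: pvSubIdx cs i)
      = cs :: pvSubIdx cs (i + 1) := by
  have hdiff : PySem.Set.diff (PySem.Set.ofList ['A', 'C', 'T', 'G']) (PySem.Set.ofList [cs.getD i ' '])
      = ['A', 'C', 'T', 'G'].filter (fun c => !decide (c = cs.getD i ' ')) := by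
    simp [PySem.Set.diff, PySem.Set.ofList, PySem.Set.contains]
  have hgd : cs.getD i ' ' = cs[i] := List.getD_eq_getElem cs ' ' hi
  rw [hdiff, ← PySem.Set.update_map_eq_foldl_add, PySem.Set.update_eq_append_of_disjoint]
  · rw [List.cons_append]
    congr 1
    rw [pvSubIdx, pvSubIdx, List.range_succ, List.flatMap_append]
    simp
  · -- the substitutions at position i are pairwise distinct
    refine List.Nodup.map ?_ (List.Nodup.filter _ (by decide))
    intro a b hab
    have := congrArg (fun l => l[i]?) hab
    simpa [List.getElem?_set_self hi] using this
  · -- freshness: no substitution at position i is already present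
    intro x hx
    simp only [List.mem_map, List.mem_filter] at hx
    obtain ⟨c, ⟨-, hc⟩, rfl⟩ := hx
    rw [Bool.not_eq_eq_eq_not, Bool.not_true, decide_eq_false_iff_not, hgd] at hc
    simp only [List.mem_cons, not_or]
    constructor
    · intro he
      have := congrArg (fun l => l[i]?) he
      simp only [List.getElem?_set_self hi, List.getElem?_eq_getElem hi] at this
      exact hc (by simpa using this)
    · intro hmem
      obtain ⟨j, hj, d, hd, he⟩ := pvSubIdx_mem (le_of_lt hi) hmem
      have hij : i ≠ j := by omega
      have := congrArg (fun l => l[j]?) he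
      simp only [List.getElem?_set_ne hij, List.getElem?_set_self (by omega : j < cs.length),
        List.getElem?_eq_getElem (by omega : j < cs.length)] at this
      exact hd ((by simpa using this : cs[j]'(lt_trans hj hi) = d)).symm

theorem pvA_loop (cs : List Char) (k : Nat) (hk : k ≤ cs.length) :
    (List.range k).foldl (fun neighbours i =>
      (PySem.Set.diff (PySem.Set.ofList ['A', 'C', 'T', 'G']) (PySem.Set.ofList [cs.getD i ' '])).foldl
        (fun nb element => PySem.Set.add nb (cs.set i element)) neighbours)
      (PySem.Set.add PySem.Set.empty cs) = cs :: pvSubIdx cs k := by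
  induction k with
  | zero => simp [pvSubIdx, PySem.Set.add, PySem.Set.empty, PySem.Set.contains]
  | succ k ih =>
    rw [List.range_succ, List.foldl_append, ih (by omega)]
    simpa using pvA_step cs k (by omega)

theorem pvSubIdx_full (cs : List Char) : pvSubIdx cs cs.length = pvSub cs := by
  induction cs with
  | nil => simp [pvSubIdx, pvSub]
  | cons h t ih =>
    rw [pvSub, ← ih]
    show pvSubIdx (h :: t) (t.length + 1) = _
    rw [pvSubIdx, pvSubIdx, List.range_succ_eq_map, List.flatMap_cons, List.flatMap_map,
      List.map_flatMap]
    simp [List.map_map, Function.comp_def]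

-- ===== B side =====
theorem pvB_step (t : List Char) (h : Char) :
    pvAltStep (t :: pvSub t, t) h = ((h :: t) :: pvSub (h :: t), h :: t) := by
  unfold pvAltStep
  simp only []
  have h0 : PySem.Set.add (PySem.Set.empty (α := List Char)) (h :: t) = [h :: t] := rfl
  rw [h0]
  have h1 : ['A', 'C', 'T', 'G'].foldl (fun s symbol => PySem.Set.add s (symbol :: t)) [h :: t]
      = (h :: t) :: (['A', 'C', 'T', 'G'].filter (fun c => !decide (c = h))).map (fun c => c :: t) := by
    have hnd : ((['A', 'C', 'T', 'G'] : List Char).map (fun c => c :: t)).Nodup :=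
      List.Nodup.map (fun a b hab => by simpa using hab) (by decide)
    rw [← PySem.Set.update_map_eq_foldl_add, PySem.Set.update_eq_append_filter,
      PySem.Set.ofList_eq_self_of_nodup _ hnd, List.filter_map]
    simp [Function.comp_def, PySem.Set.contains]
  rw [h1]
  set P := (['A', 'C', 'T', 'G'].filter (fun c => !decide (c = h))).map (fun c => c :: t) with hP
  have hPmem : ∀ y ∈ P, ∃ c, ¬c = h ∧ y = c :: t := by
    intro y hy
    rw [hP] at hy
    simp only [List.mem_map, List.mem_filter] at hy
    obtain ⟨c, ⟨-, hc⟩, rfl⟩ := hy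
    exact ⟨c, by simpa using hc, rfl⟩
  have h2 : (t :: pvSub t).foldl (fun s x => PySem.Set.add s (h :: x)) ((h :: t) :: P)
      = (h :: t) :: (P ++ (pvSub t).map (fun x => h :: x)) := by
    have hnd : ((t :: pvSub t).map (fun x => h :: x)).Nodup :=
      List.Nodup.map (fun a b hab => by simpa using hab) (pvSub_nodup t)
    rw [← PySem.Set.update_map_eq_foldl_add]
    rw [show ((t :: pvSub t).map (fun x => h :: x)) = (h :: t) :: (pvSub t).map (fun x => h :: x) from by simp]
    rw [PySem.Set.update_eq_append_filter]
    rw [PySem.Set.ofList_eq_self_of_nodup _ (by simpa using hnd)]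
    rw [List.filter_cons_of_neg (by simp [PySem.Set.contains])]
    rw [List.filter_eq_self.mpr ?fresh]
    · simp
    case fresh =>
      intro y hy
      simp only [List.mem_map] at hy
      obtain ⟨x, hx, rfl⟩ := hy
      simp only [PySem.Set.contains, List.contains_eq_mem, List.mem_cons]
      simp only [Bool.not_eq_eq_eq_not, Bool.not_true, decide_eq_false_iff_not, not_or]
      refine ⟨fun he => (pvSub_shape hx).2 (by simpa using he), fun hm => ?_⟩
      obtain ⟨c, hc, he⟩ := hPmem _ hm
      rw [List.cons.injEq] at he
      exact hc he.1.symm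
  rw [h2, hP]
  simp [pvSub]

theorem pvB_loop (cs : List Char) :
    cs.reverse.foldl pvAltStep (PySem.Set.add PySem.Set.empty [], []) = (cs :: pvSub cs, cs) := by
  induction cs with
  | nil => simp [pvSub, PySem.Set.add, PySem.Set.empty, PySem.Set.contains]
  | cons h t ih =>
    rw [List.reverse_cons, List.foldl_append, ih]
    simpa using pvB_step t h

-- ===== VERDICT (by name: the statement is the Claim_ definition above) =====
theorem immediate_neighbours_spec : Claim_equal_immediate_neighbours := by
  intro pattern _
  unfold Spec_immediate_neighbours immediate_neighbours immediate_neighbours_alt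
  simp only []
  rw [pvB_loop, pvA_loop pattern.toList pattern.toList.length le_rfl, pvSubIdx_full]
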